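-- pv_equiv track=rewrite | github.com/ratana11/python | PythonMeetBio.py | FrequencyMap1
-- ===== SOURCE A (Python) =====
-- def FrequencyMap1(Text, k):
--     freq = {}
--     n = len(Text)
--     for i in range (n-k+1):
--         Pattern = Text [i:i+k]
--         if Pattern not in freq:
--             freq [Pattern] = 1
--         else:
--             freq [Pattern] += 1
--     return freq
-- ===== SOURCE B (Python) =====
-- def FrequencyMap1(Text, k):
--     n = len(Text)
--     subs = [Text[i:i+k] for i in range(n - k + 1)]
--     counts = {}
--     cur = None
--     run = 0
--     for s in sorted(subs):
--         if s == cur: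
--             run += 1
--         else:
--             if cur is not None:
--                 counts[cur] = run
--             cur = s
--             run = 1
--     if cur is not None:
--         counts[cur] = run
--     return {s: counts[s] for s in dict.fromkeys(subs)}
-- ===== Notes on version B (the rewrite author's own statement) =====
-- stated objective: alternative
-- what changed: B replaces A's incremental hash-map counting loop with a sort-and-sweep: it materialises all length-k substrings, sorts them, run-length-encodes the sorted list to get each substring's count, and finally emits the counts in first-occurrence order via dict.fromkeys.
import Mathlib
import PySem

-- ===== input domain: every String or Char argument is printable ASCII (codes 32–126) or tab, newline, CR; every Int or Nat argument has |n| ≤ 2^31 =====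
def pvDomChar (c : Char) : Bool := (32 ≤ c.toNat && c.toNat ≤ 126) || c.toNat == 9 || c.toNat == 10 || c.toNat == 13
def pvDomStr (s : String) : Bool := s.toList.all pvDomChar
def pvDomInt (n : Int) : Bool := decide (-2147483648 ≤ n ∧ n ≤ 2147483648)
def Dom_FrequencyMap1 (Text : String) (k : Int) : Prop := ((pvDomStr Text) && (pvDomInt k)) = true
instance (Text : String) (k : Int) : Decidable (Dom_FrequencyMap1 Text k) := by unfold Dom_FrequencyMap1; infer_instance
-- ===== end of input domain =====

-- B replaces A's hash-counting loop by a sort-and-sweep run-length count, presented in first-occurrence order (objective: alternative algorithm).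

-- ===== PORT A =====
def FrequencyMap1 (Text : String) (k : Int) : List (String × Int) :=
  let n := PySem.Str.len Text
  ((PySem.List.pyRange 0 (n - k + 1) 1).foldl
    (fun freq i =>
      let Pattern := PySem.Str.slice Text (some i) (some (i + k))
      if freq.contains Pattern = false then freq.insert Pattern 1
      -- freq[Pattern] += 1: the key is present on this branch, so getD reads exactly Python's freq[Pattern]
      else freq.insert Pattern (freq.getD Pattern 0 + 1))
    PySem.Dict.empty).items

-- ===== PORT B =====
-- loop body of Source B's sweep over sorted(subs); state = (counts, cur, run)
def pvSweepStep (st : PySem.Dict String Int × Option String × Int) (s : String) :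
    PySem.Dict String Int × Option String × Int :=
  match st with
  | (counts, cur, run) =>
    if some s = cur then (counts, cur, run + 1)
    else
      match cur with
      | some c => (counts.insert c run, some s, 1)
      | none => (counts, some s, 1)

-- Source B's final 'if cur is not None: counts[cur] = run'
def pvSweepFlush (st : PySem.Dict String Int × Option String × Int) : PySem.Dict String Int :=
  match st with
  | (counts, some c, run) => counts.insert c run
  | (counts, none, _) => counts

def FrequencyMap1_alt (Text : String) (k : Int) : List (String × Int) :=
  let n := PySem.Str.len Text
  let subs := (PySem.List.pyRange 0 (n - k + 1) 1).map
    (fun i => PySem.Str.slice Text (some i) (some (i + k)))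
  -- sorted(subs): ported as Mathlib's stable mergeSort (the corresponding Lean library sort)
  let counts := pvSweepFlush
    ((subs.mergeSort (fun a b => decide (a ≤ b))).foldl pvSweepStep (PySem.Dict.empty, none, 0))
  -- {s: counts[s] for s in dict.fromkeys(subs)}: every s there is a key of counts, so getD reads exactly counts[s]
  ((PySem.List.dedup subs).foldl (fun d s => d.insert s (counts.getD s 0)) PySem.Dict.empty).items

-- ===== PRECONDITION & SPEC =====
def Spec_FrequencyMap1 (Text : String) (k : Int) (out : List (String × Int)) : Prop := out = FrequencyMap1_alt Text k
instance (Text : String) (k : Int) (out : List (String × Int)) : Decidable (Spec_FrequencyMap1 Text k out) := by unfold Spec_FrequencyMap1; infer_instance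

-- ===== CLAIM (what is proved, stated in full; the proofs are below) =====
def Claim_equal_FrequencyMap1 : Prop := ∀ (Text : String) (k : Int), Dom_FrequencyMap1 Text k → Spec_FrequencyMap1 Text k (FrequencyMap1 Text k)

-- ===== LEMMAS AND PROOFS =====

-- A's loop is the standard counter fold
lemma pvA_fold_eq_counter (xs : List String) :
    xs.foldl
      (fun freq P =>
        if freq.contains P = false then freq.insert P 1
        else freq.insert P (freq.getD P 0 + 1))
      PySem.Dict.empty = PySem.Dict.counter xs := by
  rw [← PySem.Dict.foldl_insert_getD_add_one_eq_counter]
  congr 1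
  funext d P
  by_cases h : d.contains P = false
  · have h0 : d.getD P 0 = 0 := by
      simp [PySem.Dict.getD, (PySem.Dict.get?_eq_none_iff_contains d P).2 h]
    simp [h, h0]
  · simp [h]

-- the sweep with an open run (cur = some a, run = m) over a sorted remainder
lemma pvSweep_run (xs : List String) (h1 : xs.Pairwise (· ≤ ·)) :
    ∀ (d : PySem.Dict String Int) (a : String) (m : Int), (∀ y ∈ xs, a ≤ y) →
    ∀ s, (pvSweepFlush (xs.foldl pvSweepStep (d, some a, m))).getD s 0 =
      if s = a then m + xs.count a else if s ∈ xs then (xs.count s : Int) else d.getD s 0 := by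
  induction xs with
  | nil =>
    intro d a m _ s
    simp [pvSweepFlush, PySem.Dict.getD_insert]
  | cons x xs ih =>
    intro d a m hb s
    have hpw := (List.pairwise_cons.mp h1)
    by_cases hxa : x = a
    · subst hxa
      have hstep : pvSweepStep (d, some x, m) x = (d, some x, m + 1) := by
        simp [pvSweepStep]
      rw [List.foldl_cons, hstep, ih hpw.2 d x (m + 1) hpw.1 s]
      by_cases hsx : s = x
      · subst hsx; simp; ring
      · simp [hsx, Ne.symm hsx, List.mem_cons]
    · have hax : a < x := lt_of_le_of_ne (hb x (List.mem_cons_self)) (Ne.symm hxa)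
      have hstep : pvSweepStep (d, some a, m) x = (d.insert a m, some x, 1) := by
        simp [pvSweepStep, hxa]
      rw [List.foldl_cons, hstep, ih hpw.2 (d.insert a m) x 1 hpw.1 s]
      have hanotin : a ∉ xs := fun hm => absurd (hpw.1 a hm) (not_le.mpr hax)
      by_cases hsx : s = x
      · subst hsx
        simp [hxa, List.mem_cons]
        ring
      · by_cases hsa : s = a
        · subst hsa
          simp [hsx, Ne.symm hsx, hanotin, List.count_eq_zero.mpr hanotin]
        · simp [hsx, hsa, Ne.symm hsx, PySem.Dict.getD_insert, List.mem_cons]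

-- Python's sorted, ported as mergeSort, yields a ≤-ordered list
lemma pvMergeSort_pairwise (xs : List String) :
    (xs.mergeSort (fun a b => decide (a ≤ b))).Pairwise (· ≤ ·) := by
  have h := List.pairwise_mergeSort (le := fun a b : String => decide (a ≤ b))
    (by intro a b c hab hbc; simp at hab hbc ⊢; exact le_trans hab hbc)
    (by intro a b; simpa using le_total a b) xs
  simpa using h

-- the whole sweep computes the multiplicity of every string
lemma pvSweep_getD (L : List String) (h : L.Pairwise (· ≤ ·)) (s : String) :
    (pvSweepFlush (L.foldl pvSweepStep (PySem.Dict.empty, none, 0))).getD s 0 = L.count s := by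
  cases L with
  | nil => simp [pvSweepFlush]
  | cons x xs =>
    have hpw := List.pairwise_cons.mp h
    have hstep : pvSweepStep ((PySem.Dict.empty : PySem.Dict String Int), none, 0) x
        = (PySem.Dict.empty, some x, 1) := by
      simp [pvSweepStep]
    rw [List.foldl_cons, hstep, pvSweep_run xs hpw.2 PySem.Dict.empty x 1 hpw.1 s]
    by_cases hsx : s = x
    · subst hsx; simp; ring
    · by_cases hm : s ∈ xs
      · simp [hsx, hm, Ne.symm hsx]
      · simp [hsx, hm, Ne.symm hsx, List.count_eq_zero.mpr hm]

-- the final dict comprehension over distinct keys lists its items in order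
lemma pvFoldl_insert_items (l : List String) (f : String → Int) (d : PySem.Dict String Int)
    (hn : l.Nodup) (hd : ∀ s ∈ l, d.contains s = false) :
    (l.foldl (fun d s => d.insert s (f s)) d).items = d.items ++ l.map (fun s => (s, f s)) := by
  induction l generalizing d with
  | nil => simp
  | cons x l ih =>
    have hx : d.contains x = false := hd x (List.mem_cons_self)
    have hstep : ∀ s ∈ l, (d.insert x (f x)).contains s = false := by
      intro s hs
      rw [PySem.Dict.contains_insert]
      have hne : s ≠ x := fun he => (List.nodup_cons.mp hn).1 (he ▸ hs)
      simp [hne, hd s (List.mem_cons_of_mem _ hs)]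
    rw [List.foldl_cons, ih _ (List.nodup_cons.mp hn).2 hstep,
      PySem.Dict.items_insert_of_not_contains d (f x) hx]
    simp

-- ===== VERDICT (by name: the statement is the Claim_ definition above) =====
theorem FrequencyMap1_spec : Claim_equal_FrequencyMap1 := by
  intro Text k _
  unfold Spec_FrequencyMap1
  simp only [FrequencyMap1, FrequencyMap1_alt]
  rw [(@List.foldl_map Int String (PySem.Dict String Int)
    (fun i : Int => PySem.Str.slice Text (some i) (some (i + k)))
    (fun freq Pattern =>
      if freq.contains Pattern = false then freq.insert Pattern 1
      else freq.insert Pattern (freq.getD Pattern 0 + 1))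
    (PySem.List.pyRange 0 (PySem.Str.len Text - k + 1) 1) PySem.Dict.empty).symm]
  set subs := (PySem.List.pyRange 0 (PySem.Str.len Text - k + 1) 1).map
    (fun i => PySem.Str.slice Text (some i) (some (i + k))) with hsubs
  rw [pvA_fold_eq_counter subs, PySem.Dict.items_counter subs]
  rw [pvFoldl_insert_items _ _ _
    (by simp [PySem.List.dedup_eq_ofList, PySem.Set.nodup_ofList])
    (by intro s _; simp [PySem.Dict.contains_empty])]
  have hempty : (PySem.Dict.empty : PySem.Dict String Int).items = [] := rfl
  simp only [hempty, List.nil_append, PySem.List.dedup_eq_ofList]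
  refine List.map_congr_left ?_
  intro s _
  have hcount := pvSweep_getD (subs.mergeSort (fun a b => decide (a ≤ b)))
    (pvMergeSort_pairwise subs) s
  rw [hcount, (List.mergeSort_perm subs (fun a b => decide (a ≤ b))).count_eq s]
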